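-- pv_equiv track=rewrite | github.com/peavers-warcraft/PeaversCommons | scripts/update_patrons.py | generate_lua
-- ===== SOURCE A (Python) =====
-- def generate_lua(paying_patrons: list[str], free_followers: list[str]) -> str:
--     """Generate the PatronsInit.lua file content."""
--
--     def lua_escape(s: str) -> str:
--         """Escape a string for Lua double-quoted strings."""
--         return (s
--             .replace("\\", "\\\\")
--             .replace('"', '\\"')
--             .replace("\n", "\\n")
--             .replace("\r", "\\r")
--             .replace("\t", "\\t")
--             .replace("\0", "")  # Remove null bytes
--         )
--
--     def format_patron_list(names: list[str], tier: str) -> str: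
--         """Format a list of names as Lua table entries."""
--         if not names:
--             return ""
--         entries = []
--         for name in names:
--             escaped = lua_escape(name)
--             entries.append(f'        {{ name = "{escaped}", tier = "{tier}" }},')
--         return "\n".join(entries)
--
--     paying_lua = format_patron_list(paying_patrons, "gold")
--     followers_lua = format_patron_list(free_followers, "silver")
--
--     # Combine both lists
--     all_entries = []
--     if paying_lua:
--         all_entries.append(paying_lua)
--     if followers_lua:
--         all_entries.append(followers_lua)
--
--     combined = "\n".join(all_entries) if all_entries else "        -- No patrons yet"
--
--     return f'''-- AUTO-GENERATED FILE - DO NOT EDIT MANUALLY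
-- -- This file is automatically updated by GitHub Actions from Patreon data
-- -- Last updated: See git commit timestamp
--
-- local PeaversCommons = _G.PeaversCommons
-- local Patrons = PeaversCommons.Patrons
--
-- local function InitializePatrons()
--     if not Patrons or not Patrons.AddPatrons then
--         return false
--     end
--
--     -- Clear existing patrons to prevent duplicates on reload
--     if Patrons.Clear then
--         Patrons:Clear()
--     end
--
--     Patrons:AddPatrons({{
-- {combined}
--     }})
--
--     return true
-- end
--
-- InitializePatrons()
--
-- return InitializePatrons
-- '''
-- ===== SOURCE B (Python) =====
-- _ESC = {'\\': '\\\\', '"': '\\"', '\n': '\\n', '\r': '\\r', '\t': '\\t', '\0': ''}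
--
-- def generate_lua(paying_patrons: list[str], free_followers: list[str]) -> str:
--     """Generate the PatronsInit.lua file content (single flat pass, no per-tier blocks)."""
--     lines = []
--     for names, tier in ((paying_patrons, "gold"), (free_followers, "silver")):
--         for name in names:
--             escaped = "".join(_ESC.get(c, c) for c in name)
--             lines.append(f'        {{ name = "{escaped}", tier = "{tier}" }},')
--     combined = "\n".join(lines) if lines else "        -- No patrons yet"
--     return f'''-- AUTO-GENERATED FILE - DO NOT EDIT MANUALLY
-- -- This file is automatically updated by GitHub Actions from Patreon data
-- -- Last updated: See git commit timestamp
--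
-- local PeaversCommons = _G.PeaversCommons
-- local Patrons = PeaversCommons.Patrons
--
-- local function InitializePatrons()
--     if not Patrons or not Patrons.AddPatrons then
--         return false
--     end
--
--     -- Clear existing patrons to prevent duplicates on reload
--     if Patrons.Clear then
--         Patrons:Clear()
--     end
--
--     Patrons:AddPatrons({{
-- {combined}
--     }})
--
--     return true
-- end
--
-- InitializePatrons()
--
-- return InitializePatrons
-- '''
-- ===== Notes on version B (the rewrite author's own statement) =====
-- stated objective: simpler
-- what changed: Replaces A's two per-tier block builders plus a collect-non-empty-blocks join step with one flat pass appending formatted entry lines over [(paying,'gold'),(free,'silver')], and replaces the six chained str.replace escape passes with a single per-character escape map.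
import Mathlib
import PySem

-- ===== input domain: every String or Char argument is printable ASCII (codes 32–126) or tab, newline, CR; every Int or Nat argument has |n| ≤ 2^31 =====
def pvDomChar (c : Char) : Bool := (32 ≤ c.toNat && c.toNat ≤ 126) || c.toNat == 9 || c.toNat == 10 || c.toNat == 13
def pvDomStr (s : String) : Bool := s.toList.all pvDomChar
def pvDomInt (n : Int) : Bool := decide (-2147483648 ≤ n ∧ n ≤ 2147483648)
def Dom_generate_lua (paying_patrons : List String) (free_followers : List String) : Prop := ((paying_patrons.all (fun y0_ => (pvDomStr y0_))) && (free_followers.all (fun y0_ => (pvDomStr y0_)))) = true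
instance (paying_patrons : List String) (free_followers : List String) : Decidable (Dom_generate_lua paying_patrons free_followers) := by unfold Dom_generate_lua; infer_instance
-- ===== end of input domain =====

-- B replaces A's two per-tier block builders and block-combining step by one flat pass that
-- appends escaped entry lines (per-char escape map instead of chained str.replace); objective: simpler.

-- shared template constants (identical literals in both Python versions)
def pvHeader : List Char := "-- AUTO-GENERATED FILE - DO NOT EDIT MANUALLY\n-- This file is automatically updated by GitHub Actions from Patreon data\n-- Last updated: See git commit timestamp\n\nlocal PeaversCommons = _G.PeaversCommons\nlocal Patrons = PeaversCommons.Patrons\n\nlocal function InitializePatrons()\n    if not Patrons or not Patrons.AddPatrons then\n        return false\n    end\n\n    -- Clear existing patrons to prevent duplicates on reload\n    if Patrons.Clear then\n        Patrons:Clear()\n    end\n\n    Patrons:AddPatrons({\n".toList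
def pvFooter : List Char := "\n    })\n\n    return true\nend\n\nInitializePatrons()\n\nreturn InitializePatrons\n".toList

-- ===== PORT A =====
-- A's lua_escape: six sequential str.replace passes (exact via PySem.Chars.replace on code points)
def pvLuaEscapeA (s : List Char) : List Char :=
  PySem.Chars.replace
    (PySem.Chars.replace
      (PySem.Chars.replace
        (PySem.Chars.replace
          (PySem.Chars.replace
            (PySem.Chars.replace s ['\\'] ['\\', '\\'])
            ['"'] ['\\', '"'])
          ['\n'] ['\\', 'n'])
        ['\r'] ['\\', 'r'])
      ['\t'] ['\\', 't'])
    ['\x00'] []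

-- A's format_patron_list: early return "" on empty, else build entries list, '\n'.join
def pvFormatPatronList (names : List String) (tier : List Char) : List Char :=
  if names = [] then []
  else
    let entries := names.foldl
      (fun acc name =>
        acc ++ ["        { name = \"".toList ++ pvLuaEscapeA name.toList
                 ++ "\", tier = \"".toList ++ tier ++ "\" },".toList]) []
    PySem.Chars.join ['\n'] entries

def generate_lua (paying_patrons : List String) (free_followers : List String) : String :=
  let paying_lua := pvFormatPatronList paying_patrons "gold".toList
  let followers_lua := pvFormatPatronList free_followers "silver".toList
  let all_entries : List (List Char) := []
  let all_entries := if paying_lua = [] then all_entries else all_entries ++ [paying_lua]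
  let all_entries := if followers_lua = [] then all_entries else all_entries ++ [followers_lua]
  let combined := if all_entries = [] then "        -- No patrons yet".toList
                  else PySem.Chars.join ['\n'] all_entries
  String.ofList (pvHeader ++ combined ++ pvFooter)

-- ===== PORT B =====
-- B's per-character escape map (_ESC.get(c, c), with '\0' ↦ '')
def pvEscChar (c : Char) : List Char :=
  if c = '\\' then ['\\', '\\']
  else if c = '"' then ['\\', '"']
  else if c = '\n' then ['\\', 'n']
  else if c = '\r' then ['\\', 'r']
  else if c = '\t' then ['\\', 't']
  else if c = '\x00' then []
  else [c]

-- one formatted entry line of B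
def pvLineB (name : String) (tier : List Char) : List Char :=
  "        { name = \"".toList ++ name.toList.flatMap pvEscChar
    ++ "\", tier = \"".toList ++ tier ++ "\" },".toList

def generate_lua_alt (paying_patrons : List String) (free_followers : List String) : String :=
  let lines := [(paying_patrons, "gold".toList), (free_followers, "silver".toList)].foldl
    (fun acc pr => pr.1.foldl (fun acc2 name => acc2 ++ [pvLineB name pr.2]) acc) []
  let combined := if lines = [] then "        -- No patrons yet".toList
                  else PySem.Chars.join ['\n'] lines
  String.ofList (pvHeader ++ combined ++ pvFooter)

-- ===== PRECONDITION & SPEC =====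
def Spec_generate_lua (paying_patrons : List String) (free_followers : List String) (out : String) : Prop := out = generate_lua_alt paying_patrons free_followers
instance (paying_patrons : List String) (free_followers : List String) (out : String) : Decidable (Spec_generate_lua paying_patrons free_followers out) := by unfold Spec_generate_lua; infer_instance

-- ===== CLAIM (what is proved, stated in full; the proofs are below) =====
def Claim_equal_generate_lua : Prop := ∀ (paying_patrons : List String) (free_followers : List String), Dom_generate_lua paying_patrons free_followers → Spec_generate_lua paying_patrons free_followers (generate_lua paying_patrons free_followers)

-- ===== LEMMAS AND PROOFS =====

-- replace with a single-char needle acts pointwise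
theorem replace_go_single (a : Char) (nw : List Char) :
    ∀ (fuel : Nat) (l acc : List Char), l.length ≤ fuel →
      PySem.Chars.replace.go [a] nw fuel l acc
        = acc.reverse ++ l.flatMap (fun c => if c = a then nw else [c]) := by
  intro fuel
  induction fuel with
  | zero =>
    intro l acc h
    have : l = [] := List.eq_nil_of_length_eq_zero (Nat.le_zero.mp h)
    subst this
    simp [PySem.Chars.replace.go]
  | succ n ih =>
    intro l acc h
    cases l with
    | nil => simp [PySem.Chars.replace.go]
    | cons c t =>
      by_cases hc : c = a
      · subst hc
        have hpre : List.isPrefixOf [c] (c :: t) = true := by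
          simp [List.isPrefixOf]
        simp only [PySem.Chars.replace.go, hpre, if_pos]
        rw [ih _ _ (by simpa using Nat.le_of_succ_le_succ h)]
        simp
      · have hpre : List.isPrefixOf [a] (c :: t) = false := by
          simp [List.isPrefixOf]; exact fun h' => absurd h'.symm hc
        simp only [PySem.Chars.replace.go, hpre]
        rw [ih _ _ (Nat.le_of_succ_le_succ h)]
        simp [hc]

theorem replace_single (a : Char) (nw : List Char) (s : List Char) :
    PySem.Chars.replace s [a] nw = s.flatMap (fun c => if c = a then nw else [c]) := by
  rw [PySem.Chars.replace]
  simp only [List.isEmpty, Bool.false_eq_true, if_false]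
  exact replace_go_single a nw s.length s [] (le_refl _)

-- A's sequential replace chain equals B's per-char map
theorem escA_eq_flatMap (s : List Char) : pvLuaEscapeA s = s.flatMap pvEscChar := by
  unfold pvLuaEscapeA
  simp only [replace_single, List.flatMap_assoc]
  apply List.flatMap_congr
  intro c _
  by_cases h1 : c = '\\'; · subst h1; decide
  by_cases h2 : c = '"'; · subst h2; decide
  by_cases h3 : c = '\n'; · subst h3; decide
  by_cases h4 : c = '\r'; · subst h4; decide
  by_cases h5 : c = '\t'; · subst h5; decide
  by_cases h6 : c = '\x00'; · subst h6; decide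
  simp [h1, h2, h3, h4, h5, h6, pvEscChar]

-- both entry-appending loops compute map
theorem foldl_lines (names : List String) (tier : List Char) (acc : List (List Char)) :
    names.foldl (fun acc2 name => acc2 ++ [pvLineB name tier]) acc
      = acc ++ names.map (fun name => pvLineB name tier) := by
  induction names generalizing acc with
  | nil => simp
  | cons n ns ih => simp [List.foldl_cons, ih]

theorem lineB_ne_nil (n : String) (tier : List Char) : pvLineB n tier ≠ [] := by
  unfold pvLineB
  intro h
  have := congrArg List.length h
  simp at this

theorem join_map_ne_nil (names : List String) (tier : List Char) (h : names ≠ []) :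
    PySem.Chars.join ['\n'] (names.map (fun name => pvLineB name tier)) ≠ [] := by
  cases names with
  | nil => exact absurd rfl h
  | cons n ns =>
    cases ns with
    | nil => simpa [PySem.Chars.join_singleton] using lineB_ne_nil n tier
    | cons m ms =>
      rw [List.map_cons, List.map_cons, PySem.Chars.join_cons_cons]
      intro h'
      rw [List.append_assoc, List.append_eq_nil_iff] at h'
      exact lineB_ne_nil n tier h'.1

theorem join_append_blocks (l1 l2 : List (List Char)) (h1 : l1 ≠ []) (h2 : l2 ≠ []) :
    PySem.Chars.join ['\n'] (l1 ++ l2)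
      = PySem.Chars.join ['\n'] l1 ++ '\n' :: PySem.Chars.join ['\n'] l2 := by
  induction l1 with
  | nil => exact absurd rfl h1
  | cons x xs ih =>
    cases xs with
    | nil =>
      cases l2 with
      | nil => exact absurd rfl h2
      | cons y ys => simp [PySem.Chars.join_cons_cons, PySem.Chars.join_singleton]
    | cons x2 rest =>
      rw [show (x :: x2 :: rest) ++ l2 = x :: x2 :: (rest ++ l2) from rfl,
        PySem.Chars.join_cons_cons, PySem.Chars.join_cons_cons,
        show x2 :: (rest ++ l2) = (x2 :: rest) ++ l2 from rfl, ih (by simp)]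
      simp

-- A's format_patron_list in closed form
theorem formatA_eq (names : List String) (tier : List Char) :
    pvFormatPatronList names tier
      = if names = [] then []
        else PySem.Chars.join ['\n'] (names.map (fun name => pvLineB name tier)) := by
  unfold pvFormatPatronList
  by_cases h : names = []
  · simp [h]
  · simp only [h, if_false]
    have : (fun (acc : List (List Char)) (name : String) =>
        acc ++ ["        { name = \"".toList ++ pvLuaEscapeA name.toList
                 ++ "\", tier = \"".toList ++ tier ++ "\" },".toList])
        = fun acc name => acc ++ [pvLineB name tier] := by
      funext acc name
      rw [escA_eq_flatMap]
      rfl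
    rw [this, foldl_lines]
    simp

-- ===== VERDICT (by name: the statement is the Claim_ definition above) =====
theorem generate_lua_spec : Claim_equal_generate_lua := by
  intro p f _
  unfold Spec_generate_lua generate_lua generate_lua_alt
  simp only [List.foldl_cons, List.foldl_nil, foldl_lines, List.nil_append, formatA_eq]
  apply congrArg String.ofList
  by_cases hp : p = [] <;> by_cases hf : f = []
  · subst hp; subst hf; rfl
  · subst hp
    have hne := join_map_ne_nil f "silver".toList hf
    simp [hf] at hne ⊢
    simp [hne]
  · subst hf
    have hne := join_map_ne_nil p "gold".toList hp
    simp [hp] at hne ⊢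
    simp [hne]
  · have hmp : p.map (fun name => pvLineB name "gold".toList) ≠ [] := by
      simpa using hp
    have hmf : f.map (fun name => pvLineB name "silver".toList) ≠ [] := by
      simpa using hf
    have hnp := join_map_ne_nil p "gold".toList hp
    have hnf := join_map_ne_nil f "silver".toList hf
    rw [join_append_blocks _ _ hmp hmf]
    simp at hnp hnf ⊢
    simp [hp, hf, hnp, hnf, PySem.Chars.join_cons_cons, PySem.Chars.join_singleton]
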